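-- pv_equiv track=rewrite | github.com/dwalton76/tetrys | tetrys.py | get_col_transitions
-- ===== SOURCE A (Python) =====
-- def get_col_transitions(data):
--     count = 0
--     prev_block = True
--
--     for column in data:
--         for block in column:
--             if block and not prev_block:
--                 count += 1
--             elif not block and prev_block:
--                 count += 1
--
--             prev_block = True if block else False
--         prev_block = True
--
--     # log.info("get_col_transitions() %d" % count)
--     return count
-- ===== SOURCE B (Python) =====
-- def get_col_transitions(data):
--     # Stage 1 per column: compress the cells' truthiness into the list of
--     # maximal-run keys (groupby-style).  Stage 2: closed form on the runs —
--     # a column with r runs has r-1 internal transitions, plus one boundary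
--     # transition against the virtual leading True iff the first run is falsy.
--     total = 0
--     for column in data:
--         runs = []
--         for b in map(bool, column):
--             if not runs or runs[-1] != b:
--                 runs.append(b)
--         if runs:
--             total += len(runs) - 1 if runs[0] else len(runs)
--     return total
-- ===== Notes on version B (the rewrite author's own statement) =====
-- stated objective: alternative
-- what changed: Replaces A's cell-by-cell prev_block state machine with a two-stage per-column computation: first compress each column into its list of maximal truthiness-run keys (groupby-style), then add a closed-form count — runs-1 if the first run is truthy, runs if it is falsy (encoding the virtual leading True).
import Mathlib
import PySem

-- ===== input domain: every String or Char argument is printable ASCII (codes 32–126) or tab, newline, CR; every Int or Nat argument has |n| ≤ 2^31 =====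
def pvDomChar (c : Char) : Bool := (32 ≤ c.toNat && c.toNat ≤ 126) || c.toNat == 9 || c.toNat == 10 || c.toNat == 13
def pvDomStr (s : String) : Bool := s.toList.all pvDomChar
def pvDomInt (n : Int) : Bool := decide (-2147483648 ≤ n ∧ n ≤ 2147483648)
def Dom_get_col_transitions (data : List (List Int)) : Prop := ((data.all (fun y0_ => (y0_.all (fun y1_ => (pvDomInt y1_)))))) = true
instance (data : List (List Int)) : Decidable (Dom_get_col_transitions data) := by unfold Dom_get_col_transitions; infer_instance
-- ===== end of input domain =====

-- B replaces A's cell-by-cell prev_block state machine by a two-stage per-column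
-- computation: compress the column into its maximal truthiness-run keys, then a
-- closed form on the runs (objective: alternative decomposition, same cost).

-- ===== PORT A =====
-- state = (count, prev_block); inner loop over a column, prev reset to true after each column
def get_col_transitions (data : List (List Int)) : Int :=
  (data.foldl (fun (s : Int × Bool) column =>
    let s2 := column.foldl (fun (t : Int × Bool) block =>
      let c :=
        if block ≠ 0 ∧ ¬ (t.2 = true) then t.1 + 1
        else if ¬ (block ≠ 0) ∧ t.2 = true then t.1 + 1
        else t.1
      (c, if block ≠ 0 then true else false)) s
    (s2.1, true)) (0, true)).1

-- ===== PORT B =====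
-- Source B's inner run-compression loop: append b iff runs is empty or its last key differs
def pvStep (runs : List Bool) (b : Bool) : List Bool :=
  if runs = [] ∨ runs.getLast? ≠ some b then runs ++ [b] else runs

def get_col_transitions_alt (data : List (List Int)) : Int :=
  data.foldl (fun total column =>
    let runs := (column.map (fun x => decide (x ≠ 0))).foldl pvStep []
    match runs with
    | [] => total
    | r :: rs => total + (if r then ((r :: rs).length : Int) - 1 else ((r :: rs).length : Int))) 0

-- ===== PRECONDITION & SPEC =====
def Spec_get_col_transitions (data : List (List Int)) (out : Int) : Prop := out = get_col_transitions_alt data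
instance (data : List (List Int)) (out : Int) : Decidable (Spec_get_col_transitions data out) := by unfold Spec_get_col_transitions; infer_instance

-- ===== CLAIM =====
def Claim_equal_get_col_transitions : Prop := ∀ (data : List (List Int)), Dom_get_col_transitions data → Spec_get_col_transitions data (get_col_transitions data)

-- ===== LEMMAS AND PROOFS =====

/-- transitions in a column seen from previous truthiness `b` (A's inner loop, functionally). -/
def pvF (b : Bool) : List Int → Int
  | [] => 0
  | x :: xs => (if (decide (x ≠ 0)) ≠ b then 1 else 0) + pvF (decide (x ≠ 0)) xs

/-- number of truthiness changes of a boolean list relative to previous value `p`. -/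
def pvChg (p : Bool) : List Bool → Nat
  | [] => 0
  | b :: bs => (if b ≠ p then 1 else 0) + pvChg b bs

theorem pvA_inner (xs : List Int) : ∀ (c : Int) (b : Bool),
    (xs.foldl (fun (t : Int × Bool) block =>
      let c :=
        if block ≠ 0 ∧ ¬ (t.2 = true) then t.1 + 1
        else if ¬ (block ≠ 0) ∧ t.2 = true then t.1 + 1
        else t.1
      (c, if block ≠ 0 then true else false)) (c, b)).1 = c + pvF b xs := by
  induction xs with
  | nil => intro c b; simp [pvF]
  | cons x xs ih =>
    intro c b
    simp only [List.foldl_cons, pvF]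
    rw [ih]
    by_cases hx : x = 0 <;> cases b <;> simp [hx] <;> ring

theorem pvF_chg (xs : List Int) : ∀ (b : Bool),
    pvF b xs = (pvChg b (xs.map (fun x => decide (x ≠ 0))) : Int) := by
  induction xs with
  | nil => intro b; simp [pvF, pvChg]
  | cons x xs ih =>
    intro b
    simp only [pvF, List.map_cons, pvChg, ih]
    split_ifs <;> push_cast <;> ring

theorem pvFoldStep (bs : List Bool) : ∀ (acc : List Bool) (l : Bool),
    acc.getLast? = some l →
    (bs.foldl pvStep acc).length = acc.length + pvChg l bs ∧
    (bs.foldl pvStep acc).headI = acc.headI := by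
  induction bs with
  | nil => intro acc l _; simp [pvChg]
  | cons b bs ih =>
    intro acc l hl
    have hne : acc ≠ [] := by intro h; simp [h] at hl
    by_cases hb : b = l
    · have hstep : pvStep acc b = acc := by
        simp [pvStep, hne, hl, hb]
      subst hb
      simp only [List.foldl_cons, hstep, pvChg]
      have := ih acc b hl
      simpa using this
    · have hstep : pvStep acc b = acc ++ [b] := by
        unfold pvStep; rw [if_pos]; right; rw [hl]
        simp; exact fun h => hb h.symm
      simp only [List.foldl_cons, hstep, pvChg]
      have hlast : (acc ++ [b]).getLast? = some b := by simp
      have := ih (acc ++ [b]) b hlast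
      constructor
      · rw [this.1]; simp [hb]; omega
      · rw [this.2]; cases acc with
        | nil => exact absurd rfl hne
        | cons a as => simp

/-- B's per-column value equals A's per-column transition count. -/
theorem pvAltCol (column : List Int) (total : Int) :
    (let runs := (column.map (fun x => decide (x ≠ 0))).foldl pvStep []
     match runs with
     | [] => total
     | r :: rs => total + (if r then ((r :: rs).length : Int) - 1 else ((r :: rs).length : Int)))
    = total + pvF true column := by
  cases column with
  | nil => simp [pvF]
  | cons c cs =>
    simp only [List.map_cons]
    have h0 : pvStep [] (decide (c ≠ 0)) = [decide (c ≠ 0)] := by simp [pvStep]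
    have h := pvFoldStep (cs.map (fun x => decide (x ≠ 0))) [decide (c ≠ 0)] (decide (c ≠ 0)) (by simp)
    simp only [List.foldl_cons, h0]
    cases hruns : ((cs.map (fun x => decide (x ≠ 0))).foldl pvStep [decide (c ≠ 0)]) with
    | nil =>
      rw [hruns] at h
      have := h.1
      simp at this
      omega
    | cons r rs =>
      rw [hruns] at h
      have hr : r = decide (c ≠ 0) := by simpa using h.2
      have hlen : rs.length = pvChg (decide (c ≠ 0)) (cs.map (fun x => decide (x ≠ 0))) := by
        have := h.1
        simp only [List.length_cons, List.length_nil] at this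
        omega
      have hpf : pvF true (c :: cs) =
          (if (decide (c ≠ 0)) ≠ true then 1 else 0) + pvF (decide (c ≠ 0)) cs := rfl
      rw [hpf, pvF_chg cs, hr, ← hlen]
      by_cases hc : c = 0 <;> simp [hc] <;> push_cast <;> ring

theorem pvMain (data : List (List Int)) : ∀ (acc : Int),
    (data.foldl (fun (s : Int × Bool) column =>
      let s2 := column.foldl (fun (t : Int × Bool) block =>
        let c :=
          if block ≠ 0 ∧ ¬ (t.2 = true) then t.1 + 1
          else if ¬ (block ≠ 0) ∧ t.2 = true then t.1 + 1
          else t.1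
        (c, if block ≠ 0 then true else false)) s
      (s2.1, true)) (acc, true)).1 =
    data.foldl (fun total column =>
      let runs := (column.map (fun x => decide (x ≠ 0))).foldl pvStep []
      match runs with
      | [] => total
      | r :: rs => total + (if r then ((r :: rs).length : Int) - 1 else ((r :: rs).length : Int))) acc := by
  induction data with
  | nil => intro acc; simp
  | cons column rest ih =>
    intro acc
    simp only [List.foldl_cons]
    rw [pvA_inner column acc true, ih, pvAltCol]

-- ===== VERDICT =====
theorem get_col_transitions_spec : Claim_equal_get_col_transitions := by
  intro data _
  unfold Spec_get_col_transitions get_col_transitions get_col_transitions_alt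
  exact pvMain data 0
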